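-- pv_equiv track=rewrite | github.com/michalbielcc/erp-mvc | model/store/store.py | get_counts_by_manufacturers
-- ===== SOURCE A (Python) =====
-- def get_counts_by_manufacturers(table):
--     """
--     Question: How many different kinds of game are available of each manufacturer?
--
--     Args:
--         table (list): data table to work on
--
--     Returns:
--          dict: A dictionary with this structure: { [manufacturer] : [count] }
--     """
--     games = {}
--     manufacturers = set()
--     amount = 0
--
--     for i in table:
--         manufacturers.add(i[2])
--
--     for i in table:
--         if i[2] in games:
--             amount = games.get(i[2])
--             amount += 1
--             games[i[2]] = amount
--             amount = 0
--
--         if i[2] not in games: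
--             if i[2] in manufacturers:
--                 games[i[2]] = 1
--                 amount = 0
--     return games
-- ===== SOURCE B (Python) =====
-- def get_counts_by_manufacturers(table):
--     column = [row[2] for row in table]
--     return {key: column.count(key) for key in dict.fromkeys(column)}
-- ===== Notes on version B (the rewrite author's own statement) =====
-- stated objective: simpler
-- what changed: Instead of two loops over the table with a running dict/set and mutable 'amount' state, B extracts the manufacturer column once, deduplicates it preserving first occurrence via dict.fromkeys, and builds the result dict by counting each distinct key directly with list.count.
import Mathlib
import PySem

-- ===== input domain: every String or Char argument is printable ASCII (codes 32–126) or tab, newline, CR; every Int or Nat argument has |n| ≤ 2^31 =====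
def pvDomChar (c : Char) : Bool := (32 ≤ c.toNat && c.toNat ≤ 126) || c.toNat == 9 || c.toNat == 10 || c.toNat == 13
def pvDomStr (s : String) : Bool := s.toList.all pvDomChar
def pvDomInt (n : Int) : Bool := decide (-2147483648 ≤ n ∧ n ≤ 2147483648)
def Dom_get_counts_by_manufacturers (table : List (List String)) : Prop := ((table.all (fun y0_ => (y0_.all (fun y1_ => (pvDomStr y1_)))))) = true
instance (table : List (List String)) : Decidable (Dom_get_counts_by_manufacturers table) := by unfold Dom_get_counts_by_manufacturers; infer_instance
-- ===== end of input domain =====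

-- B replaces A's two stateful loops (running dict + set + mutable amount) by: extract the
-- manufacturer column, dedup it in first-occurrence order, count each distinct key directly.
-- Objective: simpler (no speed claim).

-- ===== PORT A =====
-- rows shorter than 3 raise IndexError in Python and are excluded by Pre_; pyGetD is exact there
def get_counts_by_manufacturers (table : List (List String)) : List (String × Int) :=
  let manufacturers : PySem.Set String :=
    table.foldl (fun s i => PySem.Set.add s (PySem.List.pyGetD i 2 "")) PySem.Set.empty
  let games : PySem.Dict String Int :=
    table.foldl (fun g i =>
      let key := PySem.List.pyGetD i 2 ""
      let g := if g.contains key then g.insert key (g.getD key 0 + 1) else g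
      if g.contains key then g
      else if PySem.Set.contains manufacturers key then g.insert key 1 else g)
      PySem.Dict.empty
  games.items

-- ===== PORT B =====
def get_counts_by_manufacturers_alt (table : List (List String)) : List (String × Int) :=
  let column := table.map (fun row => PySem.List.pyGetD row 2 "")
  (PySem.List.dedup column).map (fun key => (key, (PySem.List.count column key : Int)))

-- ===== PRECONDITION & SPEC =====
-- Pre_ excludes tables with a row of fewer than 3 cells, on which Python A raises IndexError.
def Pre_get_counts_by_manufacturers (table : List (List String)) : Prop :=
  ∀ row ∈ table, 3 ≤ row.length
instance (table : List (List String)) : Decidable (Pre_get_counts_by_manufacturers table) := by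
  unfold Pre_get_counts_by_manufacturers; infer_instance
def pvWitness_get_counts_by_manufacturers : List (List String) :=
  [["g1", "x", "Nintendo"], ["g2", "y", "Sega"], ["g3", "z", "Nintendo"]]

def Spec_get_counts_by_manufacturers (table : List (List String)) (out : List (String × Int)) : Prop := out = get_counts_by_manufacturers_alt table
instance (table : List (List String)) (out : List (String × Int)) : Decidable (Spec_get_counts_by_manufacturers table out) := by unfold Spec_get_counts_by_manufacturers; infer_instance

-- ===== CLAIM (what is proved, stated in full; the proofs are below) =====
def Claim_equal_get_counts_by_manufacturers : Prop := ∀ (table : List (List String)), Dom_get_counts_by_manufacturers table → Pre_get_counts_by_manufacturers table → Spec_get_counts_by_manufacturers table (get_counts_by_manufacturers table)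

-- ===== LEMMAS AND PROOFS =====

-- A's second loop is exactly the counting fold over the manufacturer column.
theorem games_eq_counter (table : List (List String)) :
    (table.foldl (fun g i =>
      let key := PySem.List.pyGetD i 2 ""
      let g := if g.contains key then g.insert key (g.getD key 0 + 1) else g
      if g.contains key then g
      else if PySem.Set.contains
          (table.foldl (fun s i => PySem.Set.add s (PySem.List.pyGetD i 2 "")) PySem.Set.empty)
          key then g.insert key 1 else g)
      PySem.Dict.empty)
    = PySem.Dict.counter (table.map (fun row => PySem.List.pyGetD row 2 "")) := by
  rw [← PySem.Dict.foldl_insert_getD_add_one_eq_counter, List.foldl_map]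
  apply PySem.List.foldl_congr_mem
  intro g i hi
  simp only
  by_cases h : g.contains (PySem.List.pyGetD i 2 "")
  · simp [h, PySem.Dict.contains_insert_self]
  · have hmem : PySem.List.pyGetD i 2 "" ∈
        table.foldl (fun s i => PySem.Set.add s (PySem.List.pyGetD i 2 "")) ([] : PySem.Set String) := by
      have h2 : PySem.List.pyGetD i 2 "" ∈
          PySem.Set.ofList (table.map (fun i => PySem.List.pyGetD i 2 "")) :=
        (PySem.Set.mem_ofList _ _).mpr (List.mem_map_of_mem hi)
      simpa [PySem.Set.ofList_eq_foldl, List.foldl_map] using h2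
    have hf : g.contains (PySem.List.pyGetD i 2 "") = false := by simpa using h
    simp [h, hmem, PySem.Dict.getD_of_not_contains _ (0 : Int) hf]


-- ===== VERDICT (by name: the statement is the Claim_ definition above) =====
theorem get_counts_by_manufacturers_spec : Claim_equal_get_counts_by_manufacturers := by
  intro table _ _
  unfold Spec_get_counts_by_manufacturers get_counts_by_manufacturers get_counts_by_manufacturers_alt
  dsimp only
  rw [games_eq_counter table]
  simp only [PySem.Dict.items_counter, PySem.List.dedup_eq_ofList, PySem.List.count_eq]
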